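-- pv_equiv track=rewrite | github.com/MrBrantCode/unitest_baseline | mut_generate/mist_train_cf/cf_31225/solution.py | count_edits
-- ===== SOURCE A (Python) =====
-- def count_edits(original: str, target: str, window: int) -> int:
--     if len(original) != len(target):
--         return -1  # Strings must be of equal length for comparison
--
--     edits = 0
--     for i in range(len(original) - window + 1):
--         substring = original[i:i + window]
--         target_substring = target[i:i + window]
--         edits += sum(1 for char1, char2 in zip(substring, target_substring) if char1 != char2)
--
--     return edits
-- ===== SOURCE B (Python) =====
-- def count_edits(original: str, target: str, window: int) -> int:
--     if len(original) != len(target):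
--         return -1  # Strings must be of equal length for comparison
--
--     n = len(original)
--     if window <= 0 or window > n:
--         return 0
--
--     total = 0
--     for j, (c1, c2) in enumerate(zip(original, target)):
--         if c1 != c2:
--             # number of windows [i, i+window) with 0 <= i <= n-window covering j
--             total += min(j + 1, window, n - j, n - window + 1)
--     return total
-- ===== Notes on version B (the rewrite author's own statement) =====
-- stated objective: faster
-- what changed: Instead of rescanning every length-`window` slice pair (O(n*window)), B makes one pass over the zipped strings and adds, for each mismatching position j, the closed-form number of windows covering j: min(j+1, window, n-j, n-window+1).
-- intended difference: For negative window (with equal-length strings, n+window >= 1, and a mismatch before the last character) Python's slice stop i+window wraps to count from the string's end, so A returns a positive mismatch count (e.g. A('ab','xb',-1)=1); B returns 0, the intended value, since no window of negative length exists. — e.g. on count_edits("ab", "xb", -1): A returns 1, B returns 0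
import Mathlib
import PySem

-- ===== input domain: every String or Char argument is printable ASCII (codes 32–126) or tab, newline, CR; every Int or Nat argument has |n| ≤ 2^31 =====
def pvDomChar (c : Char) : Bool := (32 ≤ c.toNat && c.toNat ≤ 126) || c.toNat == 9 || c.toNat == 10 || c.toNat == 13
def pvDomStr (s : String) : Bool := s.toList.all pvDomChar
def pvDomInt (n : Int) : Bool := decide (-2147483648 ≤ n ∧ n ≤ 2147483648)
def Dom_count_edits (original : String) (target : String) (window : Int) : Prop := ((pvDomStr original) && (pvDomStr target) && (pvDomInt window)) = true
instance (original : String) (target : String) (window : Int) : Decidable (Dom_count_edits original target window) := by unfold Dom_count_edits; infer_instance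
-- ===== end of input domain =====

-- B replaces A's per-window rescan by a single pass that weights each mismatching
-- position by the number of windows covering it (a closed form), a different algorithm;
-- A and B differ only on the D_ corner stated below.

-- ===== PORT A =====
def count_edits (original : String) (target : String) (window : Int) : Int :=
  let lo := original.toList
  let lt := target.toList
  if lo.length ≠ lt.length then
    -1  -- Strings must be of equal length for comparison
  else
    (PySem.List.pyRange 0 ((lo.length : Int) - window + 1) 1).foldl
      (fun edits i =>
        let substring := PySem.List.slice lo (some i) (some (i + window))
        let target_substring := PySem.List.slice lt (some i) (some (i + window))
        edits + ((substring.zip target_substring).map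
            (fun p => if p.1 ≠ p.2 then (1 : Int) else 0)).sum)
      0

-- ===== PORT B =====
def count_edits_alt (original : String) (target : String) (window : Int) : Int :=
  let lo := original.toList
  let lt := target.toList
  if lo.length ≠ lt.length then
    -1  -- Strings must be of equal length for comparison
  else
    let n : Int := lo.length
    if window ≤ 0 ∨ n < window then
      0
    else
      (PySem.List.enumerate (lo.zip lt)).foldl
        (fun total jc =>
          if jc.2.1 ≠ jc.2.2 then
            -- number of windows [i, i+window) with 0 ≤ i ≤ n-window covering position jc.1
            total + min (jc.1 + 1) (min window (min (n - jc.1) (n - window + 1)))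
          else total)
        0

-- ===== PRECONDITION & SPEC =====
-- For a negative window A's slice stop i+window can go negative, and Python wraps it to
-- count from the string's end, so A counts mismatches occurring before the last character
-- (a positive count); B returns 0 there, the intended value: no window of negative length exists.
def D_count_edits (original : String) (target : String) (window : Int) : Prop :=
  original.toList.length = target.toList.length ∧ window < 0 ∧
  1 ≤ (original.toList.length : Int) + window ∧
  ∃ p ∈ (original.toList.zip target.toList).take (original.toList.length - 1), p.1 ≠ p.2
instance (original : String) (target : String) (window : Int) : Decidable (D_count_edits original target window) := by unfold D_count_edits; infer_instance

def Spec_count_edits (original : String) (target : String) (window : Int) (out : Int) : Prop := ¬ D_count_edits original target window → out = count_edits_alt original target window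
instance (original : String) (target : String) (window : Int) (out : Int) : Decidable (Spec_count_edits original target window out) := by unfold Spec_count_edits; infer_instance

def pvDiffWitness_count_edits : String × String × Int := ("ab", "xb", -1)
def pvDiffWitnessOut_count_edits : Int × Int := (1, 0)

-- ===== CLAIM (what is proved, stated in full; the proofs are below) =====
def Claim_unchanged_count_edits : Prop := ∀ (original : String) (target : String) (window : Int), Dom_count_edits original target window → Spec_count_edits original target window (count_edits original target window)
def Claim_changed_count_edits : Prop := Dom_count_edits (pvDiffWitness_count_edits.1) (pvDiffWitness_count_edits.2.1) (pvDiffWitness_count_edits.2.2) ∧ D_count_edits (pvDiffWitness_count_edits.1) (pvDiffWitness_count_edits.2.1) (pvDiffWitness_count_edits.2.2) ∧ count_edits (pvDiffWitness_count_edits.1) (pvDiffWitness_count_edits.2.1) (pvDiffWitness_count_edits.2.2) = pvDiffWitnessOut_count_edits.1 ∧ count_edits_alt (pvDiffWitness_count_edits.1) (pvDiffWitness_count_edits.2.1) (pvDiffWitness_count_edits.2.2) = pvDiffWitnessOut_count_edits.2 ∧ pvDiffWitnessOut_count_edits.1 ≠ pvDiffWitnessOut_count_edits.2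

def Claim_exact_count_edits : Prop := ∀ (original : String) (target : String) (window : Int), Dom_count_edits original target window → D_count_edits original target window → count_edits original target window ≠ count_edits_alt original target window

-- ===== LEMMAS AND PROOFS =====

def pvMism (p : Char × Char) : Int := if p.1 ≠ p.2 then 1 else 0

theorem pv_zip_slice (lo lt : List Char) (h : lo.length = lt.length) (a b : Int) :
    (PySem.List.slice lo (some a) (some b)).zip (PySem.List.slice lt (some a) (some b))
      = PySem.List.slice (lo.zip lt) (some a) (some b) := by
  simp [PySem.List.slice, h, List.zip_eq_zipWith, List.take_zipWith, List.drop_zipWith]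

theorem pv_take_drop_sum (L : List Int) (k m : Nat) (h : k + m ≤ L.length) :
    ((L.drop k).take m).sum = ∑ i ∈ Finset.range m, L.getD (k + i) 0 := by
  have e : (L.drop k).take m = (List.range m).map (fun i => L.getD (k + i) 0) := by
    apply List.ext_getElem
    · simp; omega
    · intro i h1 h2
      simp only [List.getElem_take, List.getElem_drop, List.getElem_map, List.getElem_range]
      rw [List.getD_eq_getElem]
  rw [e]; rfl

theorem pv_core (L : List Int) (wN : Nat) (hw1 : 1 ≤ wN) (hwn : wN ≤ L.length) :
    ((List.range (L.length - wN + 1)).map (fun k => ((L.drop k).take wN).sum)).sum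
      = ((List.range L.length).map (fun j =>
          L.getD j 0 * ((min (j+1) (min wN (min (L.length - j) (L.length - wN + 1))) : Nat) : Int))).sum := by
  have hlist : ∀ (m : Nat) (f : Nat → Int), ((List.range m).map f).sum = ∑ i ∈ Finset.range m, f i :=
    fun _ _ => rfl
  rw [hlist, hlist]
  set n := L.length with hn
  set K := n - wN + 1 with hK
  calc ∑ k ∈ Finset.range K, ((L.drop k).take wN).sum
      = ∑ k ∈ Finset.range K, ∑ j ∈ Finset.range n, (if k ≤ j ∧ j < k + wN then L.getD j 0 else 0) := by
        apply Finset.sum_congr rfl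
        intro k hk
        rw [Finset.mem_range] at hk
        rw [pv_take_drop_sum L k wN (by omega), ← Finset.sum_filter]
        have hset : (Finset.range n).filter (fun j => k ≤ j ∧ j < k + wN) = Finset.Ico k (k + wN) := by
          ext j
          simp only [Finset.mem_filter, Finset.mem_range, Finset.mem_Ico]
          omega
        rw [hset, Finset.sum_Ico_eq_sum_range]
        simp
    _ = ∑ j ∈ Finset.range n, ∑ k ∈ Finset.range K, (if k ≤ j ∧ j < k + wN then L.getD j 0 else 0) :=
        Finset.sum_comm
    _ = ∑ j ∈ Finset.range n, L.getD j 0 * ((min (j+1) (min wN (min (n - j) K)) : Nat) : Int) := by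
        apply Finset.sum_congr rfl
        intro j hj
        rw [Finset.mem_range] at hj
        rw [← Finset.sum_filter]
        have hset : (Finset.range K).filter (fun k => k ≤ j ∧ j < k + wN)
            = Finset.Ico (j + 1 - wN) (min (j + 1) K) := by
          ext k
          simp only [Finset.mem_filter, Finset.mem_range, Finset.mem_Ico]
          omega
        rw [hset, Finset.sum_const, Nat.card_Ico, nsmul_eq_mul, mul_comm]
        congr 1
        rw [Nat.cast_inj]
        omega

theorem pv_A_eq (lo lt : List Char) (w : Int) (hlen : lo.length = lt.length) :
    (PySem.List.pyRange 0 ((lo.length : Int) - w + 1) 1).foldl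
      (fun edits i =>
        edits + (((PySem.List.slice lo (some i) (some (i + w))).zip
            (PySem.List.slice lt (some i) (some (i + w)))).map
            (fun p => if p.1 ≠ p.2 then (1 : Int) else 0)).sum) 0
    = ((List.range ((lo.length : Int) - w + 1).toNat).map
        (fun (k : Nat) => ((PySem.List.slice (lo.zip lt) (some (k:Int)) (some ((k:Int) + w))).map pvMism).sum)).sum := by
  rw [PySem.List.foldl_add _ (fun i => (((PySem.List.slice lo (some i) (some (i + w))).zip
      (PySem.List.slice lt (some i) (some (i + w)))).map (fun p => if p.1 ≠ p.2 then (1:Int) else 0)).sum) 0]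
  rw [PySem.List.pyRange_one]
  simp only [sub_zero, zero_add, List.map_map]
  apply congrArg List.sum
  apply List.map_congr_left
  intro k _
  simp only [Function.comp, pv_zip_slice lo lt hlen]
  apply congrArg List.sum
  apply List.map_congr_left
  intro p _
  simp [pvMism]

theorem pv_B_eq (z : List (Char × Char)) (nI w : Int) :
    (PySem.List.enumerate z).foldl
      (fun total jc => if jc.2.1 ≠ jc.2.2 then
          total + min (jc.1 + 1) (min w (min (nI - jc.1) (nI - w + 1)))
        else total) 0
    = ((List.range z.length).map
        (fun (j : Nat) => if (z.getD j (' ', ' ')).1 ≠ (z.getD j (' ', ' ')).2 then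
            min ((j:Int) + 1) (min w (min (nI - (j:Int)) (nI - w + 1))) else 0)).sum := by
  rw [PySem.List.enumerate_eq_map_pyRange z (' ', ' '), List.foldl_map]
  have hb : (fun (total : Int) (j : Int) =>
        if (PySem.List.pyGetD z j (' ',' ')).1 ≠ (PySem.List.pyGetD z j (' ',' ')).2 then
          total + min (j + 1) (min w (min (nI - j) (nI - w + 1)))
        else total)
      = fun total j => total +
          (if (PySem.List.pyGetD z j (' ',' ')).1 ≠ (PySem.List.pyGetD z j (' ',' ')).2 then
            min (j + 1) (min w (min (nI - j) (nI - w + 1))) else 0) := by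
    funext total j
    split_ifs <;> simp
  show (PySem.List.pyRange 0 (PySem.List.len z)).foldl (fun total j =>
        if (PySem.List.pyGetD z j (' ',' ')).1 ≠ (PySem.List.pyGetD z j (' ',' ')).2 then
          total + min (j + 1) (min w (min (nI - j) (nI - w + 1)))
        else total) 0 = _
  rw [hb]
  rw [PySem.List.foldl_add _ (fun j => (if (PySem.List.pyGetD z j (' ',' ')).1 ≠ (PySem.List.pyGetD z j (' ',' ')).2 then
            min (j + 1) (min w (min (nI - j) (nI - w + 1))) else 0)) 0]
  rw [PySem.List.pyRange_one]
  simp only [sub_zero, zero_add, List.map_map, PySem.List.len]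
  rw [Int.toNat_natCast]
  apply congrArg List.sum
  apply List.map_congr_left
  intro k _
  simp [Function.comp, PySem.List.pyGetD_natCast]

theorem pv_main (original target : String) (window : Int)
    (hnD : ¬ D_count_edits original target window) :
    count_edits original target window = count_edits_alt original target window := by
  simp only [count_edits, count_edits_alt]
  by_cases hlen : original.toList.length = target.toList.length
  · rw [if_neg (not_not_intro hlen), if_neg (not_not_intro hlen)]
    rw [pv_A_eq _ _ _ hlen]
    set z := original.toList.zip target.toList with hzdef
    have hzn : z.length = original.toList.length := by
      rw [hzdef, List.length_zip, hlen, min_self]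
    by_cases hg : window ≤ 0 ∨ (original.toList.length : Int) < window
    · rw [if_pos hg]
      by_cases hbig : (original.toList.length : Int) < window
      · have h0 : ((original.toList.length : Int) - window + 1).toNat = 0 := by omega
        rw [h0]
        rfl
      · have hw0 : window ≤ 0 := by tauto
        apply List.sum_eq_zero
        intro x hx
        rw [List.mem_map] at hx
        obtain ⟨k, hk, rfl⟩ := hx
        by_cases hwz : window = 0
        · subst hwz
          have he : PySem.List.slice z (some (k:Int)) (some ((k:Int))) = [] := by
            apply List.eq_nil_of_length_eq_zero
            rw [PySem.List.length_slice]
            omega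
          simp [he]
        · have hwneg : window < 0 := by omega
          by_cases hpos : 1 ≤ (original.toList.length : Int) + window
          · have hnom : ∀ p ∈ z.take (original.toList.length - 1), p.1 = p.2 := by
              intro p hp
              by_contra hc
              exact hnD ⟨hlen, hwneg, hpos, p, hp, hc⟩
            apply List.sum_eq_zero
            intro y hy
            rw [List.mem_map] at hy
            obtain ⟨p, hp, rfl⟩ := hy
            set s := PySem.List.clampIdx z.length (k:Int) with hs
            set e := PySem.List.clampIdx z.length ((k:Int) + window) with he
            have hslice : PySem.List.slice z (some (k:Int)) (some ((k:Int) + window))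
                = (z.take e).drop s := by
              rw [List.drop_take]
              simp only [PySem.List.slice, hs, he]
            rw [hslice] at hp
            have hsv : s = min k z.length := by rw [hs, PySem.List.clampIdx_natCast]
            have hcase : e ≤ z.length - 1 ∨ e ≤ s := by
              rw [he, hsv, PySem.List.clampIdx]
              split_ifs <;> omega
            rcases hcase with hE | hE
            · have hp' : p ∈ z.take (original.toList.length - 1) := by
                have : z.take e = (z.take (original.toList.length - 1)).take e := by
                  rw [List.take_take, min_eq_left (by omega)]
                rw [this] at hp
                exact List.mem_of_mem_take (List.mem_of_mem_drop hp)
              simp [pvMism, hnom p hp']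
            · exfalso
              have : (z.take e).drop s = [] := by
                apply List.eq_nil_of_length_eq_zero
                simp
                omega
              rw [this] at hp
              exact absurd hp (List.not_mem_nil)
          · -- every window is empty: N + window ≤ 0
            have hne : (original.toList.length : Int) + window ≤ 0 := by omega
            have he : PySem.List.slice z (some (k:Int)) (some ((k:Int) + window)) = [] := by
              apply List.eq_nil_of_length_eq_zero
              rw [PySem.List.length_slice]
              have : PySem.List.clampIdx z.length ((k:Int) + window)
                  ≤ PySem.List.clampIdx z.length (k:Int) := by
                simp only [PySem.List.clampIdx]
                split_ifs <;> omega
              omega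
            simp [he]
    · rw [if_neg hg]
      rcases not_or.mp hg with ⟨hg1, hg2⟩
      have hwpos : 0 < window := by omega
      have hwle : window ≤ (original.toList.length : Int) := by omega
      rw [pv_B_eq]
      set wN := window.toNat with hwN
      have hw : (wN : Int) = window := Int.toNat_of_nonneg (by omega)
      have h1 : ((original.toList.length : Int) - window + 1).toNat = z.length - wN + 1 := by
        rw [← hzn] at hwle ⊢
        omega
      rw [h1]
      have hA : ∀ k : Nat,
          ((PySem.List.slice z (some (k:Int)) (some ((k:Int) + window))).map pvMism).sum
          = (((z.map pvMism).drop k).take wN).sum := by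
        intro k
        rw [← hw, PySem.List.slice_natCast_add, List.map_take, List.map_drop]
      calc ((List.range (z.length - wN + 1)).map
              (fun (k : Nat) => ((PySem.List.slice z (some (k:Int)) (some ((k:Int) + window))).map pvMism).sum)).sum
          = ((List.range ((z.map pvMism).length - wN + 1)).map
              (fun (k : Nat) => (((z.map pvMism).drop k).take wN).sum)).sum := by
            rw [List.length_map]
            apply congrArg List.sum
            apply List.map_congr_left
            intro k _
            exact hA k
        _ = ((List.range (z.map pvMism).length).map (fun j =>
              (z.map pvMism).getD j 0 *
                ((min (j+1) (min wN (min ((z.map pvMism).length - j) ((z.map pvMism).length - wN + 1))) : Nat) : Int))).sum := by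
            apply pv_core
            · omega
            · rw [List.length_map, hzn]; omega
        _ = _ := by
            rw [List.length_map]
            apply congrArg List.sum
            apply List.map_congr_left
            intro j hj
            rw [List.mem_range] at hj
            have hget : (z.map pvMism).getD j 0 = pvMism (z.getD j (' ', ' ')) := by
              rw [List.getD_eq_getElem _ _ (by simpa using hj), List.getD_eq_getElem _ _ hj,
                List.getElem_map]
            rw [hget]
            have hcast : ((min (j+1) (min wN (min (z.length - j) (z.length - wN + 1))) : Nat) : Int)
                = min ((j:Int) + 1) (min window (min ((original.toList.length : Int) - (j:Int))
                    ((original.toList.length : Int) - window + 1))) := by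
              rw [← hzn, ← hw]
              push_cast
              omega
            rw [hcast]
            unfold pvMism
            split_ifs <;> simp
  · rw [if_pos hlen, if_pos hlen]

theorem pv_tight (original target : String) (window : Int)
    (hD : D_count_edits original target window) :
    count_edits original target window ≠ count_edits_alt original target window := by
  obtain ⟨hlen, hwneg, hpos, p, hp, hmis⟩ := hD
  have hB : count_edits_alt original target window = 0 := by
    simp only [count_edits_alt]
    rw [if_neg (not_not_intro hlen), if_pos (Or.inl (le_of_lt hwneg))]
  rw [hB]
  simp only [count_edits]
  rw [if_neg (not_not_intro hlen), pv_A_eq _ _ _ hlen]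
  set z := original.toList.zip target.toList with hzdef
  have hzn : z.length = original.toList.length := by
    rw [hzdef, List.length_zip, hlen, min_self]
  rw [← hzn] at hpos
  obtain ⟨j0, hj0lt, hj0⟩ := List.mem_iff_getElem.mp hp
  have hj0lt' : j0 < original.toList.length - 1 := by
    rw [List.length_take, hzn] at hj0lt
    omega
  have hj0z : j0 < z.length := by omega
  have hj0e : z[j0] = p := by
    rw [← hj0, List.getElem_take]
  set q := ((z.length : Int) + window).toNat with hqdef
  have hq : (q : Int) = (z.length : Int) + window := by omega
  have hq1 : 1 ≤ q := by omega
  set k0 := if j0 < q then 0 else j0 + 1 - q with hk0def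
  have hk0 : k0 ≤ j0 ∧ j0 < k0 + q ∧ k0 + q ≤ z.length ∧ (k0 : Int) + window < 0 := by
    refine ⟨?_, ?_, ?_, ?_⟩ <;> (rw [hk0def]; split_ifs <;> omega)
  obtain ⟨hk0le, hcov, hk0q, hk0w⟩ := hk0
  have hsl : PySem.List.slice z (some (k0 : Int)) (some ((k0 : Int) + window))
      = (z.drop k0).take q := by
    simp only [PySem.List.slice]
    rw [PySem.List.clampIdx_natCast]
    have hstop : PySem.List.clampIdx z.length ((k0 : Int) + window) = k0 + q := by
      rw [PySem.List.clampIdx, if_pos hk0w, if_neg (by omega)]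
      omega
    rw [hstop]
    have : k0 + q - min k0 z.length = q := by omega
    rw [min_eq_left (by omega), Nat.add_sub_cancel_left]
  -- p is in the slice
  have hmem : p ∈ (z.drop k0).take q := by
    have hidx : ((z.drop k0).take q)[j0 - k0]'(by simp; omega) = p := by
      rw [List.getElem_take, List.getElem_drop]
      simp only [Nat.add_sub_cancel' hk0le]
      exact hj0e
    rw [← hidx]
    exact List.getElem_mem _
  have hinner : (1 : Int) ≤ (((z.drop k0).take q).map pvMism).sum := by
    have h1 : pvMism p = 1 := by simp [pvMism, hmis]
    have := List.single_le_sum (l := ((z.drop k0).take q).map pvMism)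
      (by intro y hy; rw [List.mem_map] at hy; obtain ⟨r, _, rfl⟩ := hy
          unfold pvMism; split_ifs <;> omega)
      (pvMism p) (List.mem_map_of_mem hmem)
    omega
  have hk0M : k0 < ((z.length : Int) - window + 1).toNat := by omega
  have houter : (1 : Int) ≤ ((List.range (((z.length : Int)) - window + 1).toNat).map
      (fun (k : Nat) => ((PySem.List.slice z (some (k:Int)) (some ((k:Int) + window))).map pvMism).sum)).sum := by
    have hmem2 : ((PySem.List.slice z (some (k0:Int)) (some ((k0:Int) + window))).map pvMism).sum
        ∈ (List.range (((z.length : Int)) - window + 1).toNat).map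
          (fun (k : Nat) => ((PySem.List.slice z (some (k:Int)) (some ((k:Int) + window))).map pvMism).sum) :=
      List.mem_map_of_mem (List.mem_range.mpr hk0M)
    have hnn2 := List.single_le_sum (l := (List.range (((z.length : Int)) - window + 1).toNat).map
          (fun (k : Nat) => ((PySem.List.slice z (some (k:Int)) (some ((k:Int) + window))).map pvMism).sum))
      (by intro y hy; rw [List.mem_map] at hy; obtain ⟨k, _, rfl⟩ := hy
          apply List.sum_nonneg
          intro x hx; rw [List.mem_map] at hx; obtain ⟨r, _, rfl⟩ := hx
          unfold pvMism; split_ifs <;> omega)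
      _ hmem2
    rw [hsl] at hnn2
    omega
  rw [← hzn]
  omega

-- ===== VERDICT (by name: the statement is the Claim_ definition above) =====
theorem count_edits_spec : Claim_unchanged_count_edits := by
  intro o t w _ hnD
  exact pv_main o t w hnD

theorem count_edits_changed : Claim_changed_count_edits := by
  unfold Claim_changed_count_edits; decide

theorem count_edits_tight : Claim_exact_count_edits := by
  intro o t w _ hD
  exact pv_tight o t w hD
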